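-- pv_equiv track=rewrite | github.com/Rombeii/Kepfeldolgozas | main.py | correct_letters
-- ===== SOURCE A (Python) =====
-- def correct_letters(letters):
--     skip_next = False
--     returned_text = []
--     for index, text in enumerate(letters):
--         if skip_next:
--             skip_next = False
--             continue
--         if index != len(letters) - 1 and text == '.' and letters[index + 1] in ['i', '!', 'l', 'I']:
--             returned_text.append('i')
--             skip_next = True
--         elif index != len(letters) - 1 and text == '\'' and letters[index + 1] == '\'':
--             returned_text.append('"')
--             skip_next = True
--         elif index != len(letters) - 1 and text == '?' and letters[index + 1] == '.':
--             returned_text.append('"')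
--             skip_next = True
--         elif index != len(letters) - 1 and text == 'I' and letters[index + 1] == '.':
--             returned_text.append('!')
--             skip_next = True
--         else:
--             returned_text.append(text)
--     return returned_text
-- ===== SOURCE B (Python) =====
-- # Staged-pass reformulation: instead of a greedy scan with a skip flag, characterize
-- # the merged positions in closed form -- a matching pair at position i is merged iff
-- # the run of consecutive matching pairs ending at i has odd length -- then emit in one
-- # filtered comprehension.
-- _RULES = {
--     ('.', 'i'): 'i', ('.', '!'): 'i', ('.', 'l'): 'i', ('.', 'I'): 'i',
--     ("'", "'"): '"',
--     ('?', '.'): '"',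
--     ('I', '.'): '!',
-- }
--
-- def correct_letters(letters):
--     # stage 1: the pair starting at each position (last one padded with None)
--     pairs = list(zip(letters, letters[1:] + [None]))
--     # stage 2: merge mask via run-length parity (no skipping needed)
--     merge, run = [], 0
--     for p in pairs:
--         run = run + 1 if p in _RULES else 0
--         merge.append(p in _RULES and run % 2 == 1)
--     # stage 3: emit; position i is dropped iff position i-1 was merged
--     return [_RULES[p] if m else p[0]
--             for p, m, sk in zip(pairs, merge, [False] + merge) if not sk]
-- ===== Notes on version B (the rewrite author's own statement) =====
-- stated objective: alternative
-- what changed: Replaces A's greedy single pass with skip_next state by a stateless closed-form characterization computed in three staged passes: build the pair list, mark a matching pair as merged iff the run of consecutive matching pairs ending at it has odd length (a parity scan, no skipping), then emit with one filtered comprehension that drops a position iff its predecessor was merged.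
import Mathlib
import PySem

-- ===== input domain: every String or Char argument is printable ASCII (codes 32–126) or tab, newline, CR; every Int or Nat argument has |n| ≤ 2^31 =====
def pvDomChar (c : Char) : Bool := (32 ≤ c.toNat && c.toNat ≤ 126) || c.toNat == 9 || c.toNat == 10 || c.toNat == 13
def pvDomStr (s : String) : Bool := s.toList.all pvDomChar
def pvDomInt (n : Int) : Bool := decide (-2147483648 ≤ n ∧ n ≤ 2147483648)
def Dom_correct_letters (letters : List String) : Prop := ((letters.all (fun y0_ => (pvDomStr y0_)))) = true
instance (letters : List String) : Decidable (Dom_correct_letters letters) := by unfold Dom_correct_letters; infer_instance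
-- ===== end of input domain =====

-- B replaces A's greedy skip_next pass by staged passes built on a closed-form rule
-- (a matching pair is merged iff the run of matching pairs ending at it has odd length);
-- same cost, a different algorithmic characterization.

-- ===== PORT A =====
-- the loop body of A: state = (skip_next, returned_text), element = (index, text).
-- letters[index+1] is ported as pyGetD with default "": the guard index ≠ len-1 makes the default unreachable.
def correct_letters_step (letters : List String) (st : Bool × List String) (p : Int × String) : Bool × List String :=
  let skip_next := st.1
  let returned_text := st.2
  let index := p.1
  let text := p.2
  if skip_next then (false, returned_text)
  else if index ≠ (letters.length : Int) - 1 ∧ text = "." ∧ PySem.List.pyGetD letters (index + 1) "" ∈ (["i", "!", "l", "I"] : List String) then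
    (true, returned_text ++ ["i"])
  else if index ≠ (letters.length : Int) - 1 ∧ text = "'" ∧ PySem.List.pyGetD letters (index + 1) "" = "'" then
    (true, returned_text ++ ["\""])
  else if index ≠ (letters.length : Int) - 1 ∧ text = "?" ∧ PySem.List.pyGetD letters (index + 1) "" = "." then
    (true, returned_text ++ ["\""])
  else if index ≠ (letters.length : Int) - 1 ∧ text = "I" ∧ PySem.List.pyGetD letters (index + 1) "" = "." then
    (true, returned_text ++ ["!"])
  else (false, returned_text ++ [text])

def correct_letters (letters : List String) : List String :=
  ((PySem.List.enumerate letters 0).foldl (correct_letters_step letters) (false, [])).2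

-- ===== PORT B =====
-- _RULES, keyed by the pair (text, following text or None)
def pvRules : PySem.Dict (String × Option String) String :=
  PySem.Dict.mk [(("." , some "i"), "i"), (("." , some "!"), "i"), (("." , some "l"), "i"), (("." , some "I"), "i"),
                 (("'", some "'"), "\""), (("?", some "."), "\""), (("I", some "."), "!")]

-- stage 2's loop body: state = (run, merge)
def correct_letters_alt_mergeStep (st : Int × List Bool) (p : String × Option String) : Int × List Bool :=
  let run := if pvRules.contains p then st.1 + 1 else 0
  (run, st.2 ++ [pvRules.contains p && (PySem.Int.mod run 2 == 1)])

def correct_letters_alt (letters : List String) : List String :=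
  -- stage 1: pairs = list(zip(letters, letters[1:] + [None]))
  let pairs := letters.zip ((letters.drop 1).map some ++ [none])
  -- stage 2: merge mask via run-length parity
  let merge := (pairs.foldl correct_letters_alt_mergeStep (0, [])).2
  -- stage 3: filtered comprehension over zip(pairs, merge, [False] + merge);
  -- _RULES[p] is ported as (get? p).getD "": the mask m guarantees the key is present.
  (pairs.zip (merge.zip (false :: merge))).filterMap
    (fun t => if t.2.2 then none
      else some (if t.2.1 then (pvRules.get? t.1).getD "" else t.1.1))

-- ===== PRECONDITION & SPEC =====
def Spec_correct_letters (letters : List String) (out : List String) : Prop := out = correct_letters_alt letters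
instance (letters : List String) (out : List String) : Decidable (Spec_correct_letters letters out) := by unfold Spec_correct_letters; infer_instance

-- ===== CLAIM (what is proved, stated in full; the proofs are below) =====
def Claim_equal_correct_letters : Prop := ∀ (letters : List String), Dom_correct_letters letters → Spec_correct_letters letters (correct_letters letters)

-- ===== LEMMAS AND PROOFS =====

-- proof-side recursive descriptions of both programs
def pvPairsOf : List String → List (String × Option String)
  | [] => []
  | [x] => [(x, none)]
  | x :: y :: rest => (x, some y) :: pvPairsOf (y :: rest)

def pvGo : List String → List String
  | [] => []
  | [x] => [x]
  | x :: y :: rest =>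
    match pvRules.get? (x, some y) with
    | some s => s :: pvGo rest
    | none => x :: pvGo (y :: rest)

def pvMergeG : List (String × Option String) → Bool → List Bool
  | [], _ => []
  | p :: ps, sk => let m := pvRules.contains p && !sk; m :: pvMergeG ps m

def pvGoB : List (String × Option String) → Bool → List String
  | [], _ => []
  | p :: ps, sk =>
    let m := pvRules.contains p && !sk
    (if sk then [] else [if m then (pvRules.get? p).getD "" else p.1]) ++ pvGoB ps m

-- the table lookup agrees with A's branch conditions
set_option maxRecDepth 8192 in
theorem pvRules_get (x : String) (y : Option String) :
    PySem.Dict.get? pvRules (x, y) =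
      if x = "." ∧ (y = some "i" ∨ y = some "!" ∨ y = some "l" ∨ y = some "I") then some "i"
      else if x = "'" ∧ y = some "'" then some "\""
      else if x = "?" ∧ y = some "." then some "\""
      else if x = "I" ∧ y = some "." then some "!"
      else none := by
  simp only [pvRules, PySem.Dict.get?_mk_cons, beq_iff_eq, Prod.ext_iff]
  by_cases hx1 : x = "." <;> by_cases hx2 : x = "'" <;> by_cases hx3 : x = "?" <;> by_cases hx4 : x = "I" <;>
    simp_all <;> split_ifs <;> tauto

theorem pvRules_contains (p : String × Option String) :
    pvRules.contains p = (pvRules.get? p).isSome :=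
  PySem.Dict.contains_eq_isSome_get? pvRules p

theorem pvRules_none (x : String) : pvRules.get? (x, none) = none := by
  rw [pvRules_get]; simp

-- stage 1 computes pvPairsOf
theorem pairs_eq (letters : List String) :
    letters.zip ((letters.drop 1).map some ++ [none]) = pvPairsOf letters := by
  induction letters using pvPairsOf.induct with
  | case1 => simp [pvPairsOf]
  | case2 x => simp [pvPairsOf]
  | case3 x y rest ih => simpa [pvPairsOf] using ih

-- stage 2's fold computes pvMergeG at the run's parity
theorem merge_fold (ps : List (String × Option String)) :
    ∀ (r : Int) (acc : List Bool), 0 ≤ r →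
      (ps.foldl correct_letters_alt_mergeStep (r, acc)).2
        = acc ++ pvMergeG ps (PySem.Int.mod r 2 == 1) := by
  induction ps with
  | nil => intro r acc _; simp [pvMergeG]
  | cons p ps ih =>
    intro r acc hr
    by_cases hc : pvRules.contains p = true
    · have hpar : (PySem.Int.mod (r + 1) 2 == 1) = !(PySem.Int.mod r 2 == 1) := by
        rw [PySem.Int.mod_eq_emod_of_pos (by omega), PySem.Int.mod_eq_emod_of_pos (by omega)]
        rcases Int.emod_two_eq r with h | h <;>
          · have h1 : (r + 1) % 2 = (r % 2 + 1) % 2 := by omega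
            rw [h1, h]; decide
      have hstep : correct_letters_alt_mergeStep (r, acc) p
          = (r + 1, acc ++ [(PySem.Int.mod (r + 1) 2 == 1)]) := by
        simp [correct_letters_alt_mergeStep, hc]
      rw [List.foldl_cons, hstep, ih (r + 1) _ (by omega)]
      simp only [pvMergeG, hc, Bool.true_and, hpar, List.append_assoc, List.singleton_append]
    · have hc' : pvRules.contains p = false := by simpa using hc
      have hstep : correct_letters_alt_mergeStep (r, acc) p = (0, acc ++ [false]) := by
        simp [correct_letters_alt_mergeStep, hc']
      rw [List.foldl_cons, hstep, ih 0 _ (by omega)]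
      have h0 : (PySem.Int.mod 0 2 == 1) = false := by
        rw [PySem.Int.mod_eq_emod_of_pos (by omega)]; decide
      simp only [pvMergeG, hc', Bool.false_and, h0, List.append_assoc, List.singleton_append]

-- stage 3 over pvMergeG computes pvGoB
theorem emit_eq (ps : List (String × Option String)) :
    ∀ (sk : Bool),
      (ps.zip ((pvMergeG ps sk).zip (sk :: pvMergeG ps sk))).filterMap
        (fun t => if t.2.2 then none
          else some (if t.2.1 then (pvRules.get? t.1).getD "" else t.1.1))
        = pvGoB ps sk := by
  induction ps with
  | nil => intro sk; simp [pvMergeG, pvGoB]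
  | cons p ps ih =>
    intro sk
    simp only [pvMergeG, pvGoB, List.zip_cons_cons, List.filterMap_cons]
    rw [ih]
    by_cases hsk : sk <;> simp [hsk]

-- pvGoB on the pair list is pvGo
theorem goB_eq_go (letters : List String) : pvGoB (pvPairsOf letters) false = pvGo letters := by
  induction letters using pvGo.induct with
  | case1 => simp [pvPairsOf, pvGoB, pvGo]
  | case2 x =>
    simp [pvPairsOf, pvGoB, pvGo, pvRules_contains, pvRules_none]
  | case3 x y rest s hs ih =>
    have hc : pvRules.contains (x, some y) = true := by
      rw [pvRules_contains, hs]; rfl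
    cases rest with
    | nil => simp [pvPairsOf, pvGoB, pvGo, hc, hs]
    | cons r0 rs =>
      have h1 : pvGoB (pvPairsOf (x :: y :: r0 :: rs)) false
          = s :: pvGoB (pvPairsOf (r0 :: rs)) false := by
        simp [pvPairsOf, pvGoB, hc, hs]
      rw [h1, ih]
      simp [pvGo, hs]
  | case4 x y rest hn ih =>
    have hc : pvRules.contains (x, some y) = false := by
      rw [pvRules_contains, hn]; rfl
    simp only [pvPairsOf, pvGo, hn, pvGoB, hc]
    simpa using ih

-- running A's fold over the enumerated suffix starting at i produces pvGo of that suffix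
theorem correct_letters_main (letters : List String) :
    ∀ (suf : List String) (i : Nat) (acc : List String), letters.drop i = suf →
      ((PySem.List.enumerate suf (i : Int)).foldl (correct_letters_step letters) (false, acc)).2
        = acc ++ pvGo suf := by
  intro suf
  induction suf using pvGo.induct with
  | case1 =>
    intro i acc _
    simp [PySem.List.enumerate, pvGo]
  | case2 x =>
    intro i acc hdrop
    have hi : i = letters.length - 1 ∧ i < letters.length := by
      have := congrArg List.length hdrop
      simp [List.length_drop] at this
      omega
    have hlast : (i : Int) = (letters.length : Int) - 1 := by omega
    simp [PySem.List.enumerate, pvGo, correct_letters_step, hlast]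
  | case3 x y rest s hs ih =>
    intro i acc hdrop
    have hlen : i + (x :: y :: rest).length = letters.length := by
      have := congrArg List.length hdrop
      simp [List.length_drop] at this ⊢
      omega
    have hne : (i : Int) ≠ (letters.length : Int) - 1 := by
      simp at hlen; omega
    have hdrop1 : letters.drop (i + 1) = y :: rest := by
      have := congrArg (List.drop 1) hdrop
      rwa [List.drop_drop] at this
    have hdrop2 : letters.drop (i + 2) = rest := by
      have := congrArg (List.drop 1) hdrop1
      rwa [List.drop_drop] at this
    have hy : PySem.List.pyGetD letters ((i : Int) + 1) "" = y := by
      have h1 : ((i : Int) + 1) = ((i + 1 : Nat) : Int) := by push_cast; ring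
      rw [h1, PySem.List.pyGetD_natCast]
      have : letters.getD (i + 1) "" = (letters.drop (i + 1)).getD 0 "" := by
        simp [List.getD, List.getElem?_drop]
      rw [this, hdrop1]; rfl
    have halt : pvGo (x :: y :: rest) = s :: pvGo rest := by
      simp only [pvGo, hs]
    have hstep1 : ∀ t : List String,
        correct_letters_step letters (true, t) ((i : Int) + 1, y) = (false, t) := by
      intro t; simp [correct_letters_step]
    have h2 : ((i : Int) + 1 + 1) = ((i + 2 : Nat) : Int) := by push_cast; ring
    have hout : correct_letters_step letters (false, acc) ((i : Int), x) = (true, acc ++ [s]) := by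
      rw [pvRules_get] at hs
      split_ifs at hs with g1 g2 g3 g4 <;>
        (injection hs with hs'; subst hs'; simp only [correct_letters_step, hy]) <;>
        (split_ifs <;> simp_all)
    simp only [PySem.List.enumerate_cons, List.foldl_cons]
    rw [hout, hstep1, h2, ih (i + 2) _ hdrop2, halt]
    simp
  | case4 x y rest hn ih =>
    intro i acc hdrop
    have hdrop1 : letters.drop (i + 1) = y :: rest := by
      have := congrArg (List.drop 1) hdrop
      rwa [List.drop_drop] at this
    have hy : PySem.List.pyGetD letters ((i : Int) + 1) "" = y := by
      have h1 : ((i : Int) + 1) = ((i + 1 : Nat) : Int) := by push_cast; ring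
      rw [h1, PySem.List.pyGetD_natCast]
      have : letters.getD (i + 1) "" = (letters.drop (i + 1)).getD 0 "" := by
        simp [List.getD, List.getElem?_drop]
      rw [this, hdrop1]; rfl
    have halt : pvGo (x :: y :: rest) = x :: pvGo (y :: rest) := by
      simp only [pvGo, hn]
    have hout : correct_letters_step letters (false, acc) ((i : Int), x) = (false, acc ++ [x]) := by
      rw [pvRules_get] at hn
      split_ifs at hn with g1 g2 g3 g4
      simp only [correct_letters_step, hy]
      split_ifs with k1 k2 k3 k4 <;> first | rfl | (exfalso; simp_all)
    have h1 : ((i : Int) + 1) = ((i + 1 : Nat) : Int) := by push_cast; ring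
    rw [PySem.List.enumerate_cons, List.foldl_cons, hout, h1, ih (i + 1) _ hdrop1, halt]
    simp

-- B's pipeline computes pvGo
theorem correct_letters_alt_eq_go (letters : List String) :
    correct_letters_alt letters = pvGo letters := by
  show ((letters.zip ((letters.drop 1).map some ++ [none])).zip
      ((((letters.zip ((letters.drop 1).map some ++ [none])).foldl correct_letters_alt_mergeStep (0, [])).2).zip
        (false :: ((letters.zip ((letters.drop 1).map some ++ [none])).foldl correct_letters_alt_mergeStep (0, [])).2))).filterMap
      (fun t => if t.2.2 then none else some (if t.2.1 then (pvRules.get? t.1).getD "" else t.1.1))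
      = pvGo letters
  have h0 : (PySem.Int.mod 0 2 == 1) = false := by
    rw [PySem.Int.mod_eq_emod_of_pos (by omega)]; decide
  rw [pairs_eq, merge_fold (pvPairsOf letters) 0 [] (by omega), List.nil_append, h0,
    emit_eq, goB_eq_go]

-- ===== VERDICT (by name: the statement is the Claim_ definition above) =====
theorem correct_letters_spec : Claim_equal_correct_letters := by
  intro letters _
  unfold Spec_correct_letters correct_letters
  rw [correct_letters_alt_eq_go]
  simpa using correct_letters_main letters letters 0 [] (by simp)
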